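-- pv_equiv track=rewrite | github.com/qaz027/zzPractice | repeating_pairs.py | find_repeating_pairs
-- ===== SOURCE A (Python) =====
-- def find_repeating_pairs(s):
--     if len(s) < 2 or len(s) % 2 != 0:
--         return ""
--
--     result = []
--     count = 1
--     previous_pair = s[0:2]
--
--     for i in range(2, len(s), 2):
--         current_pair = s[i:i+2]
--         if current_pair == previous_pair:
--             count += 1
--         else:
--             result.append(f"{previous_pair}{count}")
--             previous_pair = current_pair
--             count = 1
--
--     # Append the last pair
--     result.append(f"{previous_pair}{count}")
--
--     return ''.join(result)
-- ===== SOURCE B (Python) =====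
-- def find_repeating_pairs(s):
--     if len(s) < 2 or len(s) % 2 != 0:
--         return ""
--     pairs = [s[i:i+2] for i in range(0, len(s), 2)]
--     out = []
--     j = 0
--     while j < len(pairs):
--         k = j + 1
--         while k < len(pairs) and pairs[k] == pairs[j]:
--             k += 1
--         out.append(f"{pairs[j]}{k - j}")
--         j = k
--     return ''.join(out)
-- ===== Notes on version B (the rewrite author's own statement) =====
-- stated objective: alternative
-- what changed: B first materialises the list of 2-char chunks, then emits runs with a two-pointer scan over that list (no count/previous_pair accumulator and no final flush), joining at the end.
import Mathlib
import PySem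

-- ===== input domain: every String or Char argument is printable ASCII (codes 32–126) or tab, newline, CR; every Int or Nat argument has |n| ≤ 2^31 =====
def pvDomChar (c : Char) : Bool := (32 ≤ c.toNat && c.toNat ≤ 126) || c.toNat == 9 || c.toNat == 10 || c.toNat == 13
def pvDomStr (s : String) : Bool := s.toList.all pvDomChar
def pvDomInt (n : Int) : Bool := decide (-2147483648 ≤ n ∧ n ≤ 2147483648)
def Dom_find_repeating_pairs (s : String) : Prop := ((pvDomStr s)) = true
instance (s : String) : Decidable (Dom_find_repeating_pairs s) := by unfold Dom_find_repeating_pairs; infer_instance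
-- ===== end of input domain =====

-- B is an alternative decomposition (chunk list + two-pointer run scan), not faster; A mutates nothing.

-- ===== PORT A =====
-- the body of A's for-loop (state = (result, count, previous_pair)); kept as a named helper
def pvStepA (st : List (List Char) × Int × List Char) (current : List Char) :
    List (List Char) × Int × List Char :=
  if current == st.2.2 then (st.1, st.2.1 + 1, st.2.2)
  else (st.1 ++ [st.2.2 ++ PySem.Int.toChars st.2.1], 1, current)

def find_repeating_pairs (s : String) : String :=
  if PySem.Str.len s < 2 ∨ PySem.Int.mod (PySem.Str.len s) 2 ≠ 0 then ""
  else
    let cs := s.toList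
    let st := (PySem.List.pyRange 2 (PySem.Str.len s) 2).foldl
      (fun st i => pvStepA st (PySem.Chars.slice cs (some i) (some (i + 2))))
      ([], 1, PySem.Chars.slice cs (some 0) (some 2))
    String.ofList (st.1 ++ [st.2.2 ++ PySem.Int.toChars st.2.1]).flatten

-- ===== PORT B =====
-- inner while: advance k while pairs[k] == head
def pvInnerScan (pairs : List (List Char)) (head : List Char) (k : Nat) : Nat :=
  if h : k < pairs.length ∧ pairs.getD k [] == head then pvInnerScan pairs head (k + 1)
  else k
termination_by pairs.length - k
decreasing_by omega

theorem pvInnerScan_ge (pairs : List (List Char)) (head : List Char) (k : Nat) :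
    k ≤ pvInnerScan pairs head k := by
  rw [pvInnerScan]
  split
  · rename_i h
    have := pvInnerScan_ge pairs head (k + 1)
    omega
  · omega
termination_by pairs.length - k
decreasing_by omega

-- outer while: one run per iteration, appending "pair" + str(k - j)
def pvOuterLoop (pairs : List (List Char)) (j : Nat) (out : List (List Char)) :
    List (List Char) :=
  if _h : j < pairs.length then
    let k := pvInnerScan pairs (pairs.getD j []) (j + 1)
    pvOuterLoop pairs k (out ++ [pairs.getD j [] ++ PySem.Int.toChars ((k : Int) - (j : Int))])
  else out
termination_by pairs.length - j
decreasing_by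
  have := pvInnerScan_ge pairs (pairs.getD j []) (j + 1); omega

def find_repeating_pairs_alt (s : String) : String :=
  if PySem.Str.len s < 2 ∨ PySem.Int.mod (PySem.Str.len s) 2 ≠ 0 then ""
  else
    let cs := s.toList
    let pairs := (PySem.List.pyRange 0 (PySem.Str.len s) 2).map
      (fun i => PySem.Chars.slice cs (some i) (some (i + 2)))
    String.ofList (pvOuterLoop pairs 0 []).flatten

-- ===== PRECONDITION & SPEC =====
def Spec_find_repeating_pairs (s : String) (out : String) : Prop := out = find_repeating_pairs_alt s
instance (s : String) (out : String) : Decidable (Spec_find_repeating_pairs s out) := by unfold Spec_find_repeating_pairs; infer_instance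

-- ===== CLAIM (what is proved, stated in full; the proofs are below) =====
def Claim_equal_find_repeating_pairs : Prop := ∀ (s : String), Dom_find_repeating_pairs s → Spec_find_repeating_pairs s (find_repeating_pairs s)

-- ===== LEMMAS AND PROOFS =====

-- the common middleman: run-length encoding of a chunk list
def pvEncodeList : List (List Char) → List Char
  | [] => []
  | p :: rest =>
      p ++ PySem.Int.toChars (((rest.takeWhile (· == p)).length : Int) + 1)
        ++ pvEncodeList (rest.dropWhile (· == p))
termination_by l => l.length
decreasing_by
  have := List.length_dropWhile_le (· == p) rest; simpa using Nat.lt_succ_of_le this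

-- A's loop state, abstracted
def pvEncW (prev : List Char) (c : Int) : List (List Char) → List Char
  | [] => prev ++ PySem.Int.toChars c
  | p :: rest =>
      if p == prev then pvEncW prev (c + 1) rest
      else prev ++ PySem.Int.toChars c ++ pvEncW p 1 rest

def pvChunks : List Char → List (List Char)
  | a :: b :: rest => [a, b] :: pvChunks rest
  | _ => []

theorem pvEncW_spec (ps : List (List Char)) (prev : List Char) (c : Int) :
    pvEncW prev c ps
      = prev ++ PySem.Int.toChars (c + ((ps.takeWhile (· == prev)).length : Int))
          ++ pvEncodeList (ps.dropWhile (· == prev)) := by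
  induction ps generalizing prev c with
  | nil => simp [pvEncW, pvEncodeList]
  | cons p rest ih =>
    by_cases hp : p == prev
    · have hpe : p = prev := by simpa using hp
      rw [pvEncW, if_pos hp, ih, List.takeWhile_cons, List.dropWhile_cons]
      subst hpe
      simp only [hp, if_pos]
      simp only [List.length_cons]
      congr 2
      congr 1
      push_cast
      ring
    · rw [pvEncW, if_neg hp, ih, List.takeWhile_cons, List.dropWhile_cons]
      simp only [hp, Bool.false_eq_true, if_false]
      rw [pvEncodeList]
      simp only [List.length_nil, Nat.cast_zero, add_zero, List.append_assoc]
      rw [add_comm]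

theorem pvDropWhile_eq_drop (p : List Char → Bool) (l : List (List Char)) :
    l.dropWhile p = l.drop (l.takeWhile p).length := by
  nth_rewrite 3 [← List.takeWhile_append_dropWhile (p := p) (l := l)]
  rw [List.drop_left]

theorem pvInnerScan_spec (pairs : List (List Char)) (head : List Char) (k : Nat) :
    pvInnerScan pairs head k = k + ((pairs.drop k).takeWhile (· == head)).length := by
  rw [pvInnerScan]
  split
  · rename_i h
    obtain ⟨hk2, hbeq⟩ := h
    have hdrop : pairs.drop k = pairs[k] :: pairs.drop (k + 1) :=
      List.drop_eq_getElem_cons hk2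
    have hget : pairs.getD k [] = pairs[k] := List.getD_eq_getElem pairs [] hk2
    rw [pvInnerScan_spec pairs head (k + 1), hdrop, List.takeWhile_cons]
    rw [hget] at hbeq
    simp only [hbeq, if_pos, List.length_cons]
    omega
  · rename_i h
    rcases Nat.lt_or_ge k pairs.length with hk2 | hk2
    · have hget : pairs.getD k [] = pairs[k] := List.getD_eq_getElem pairs [] hk2
      have hbeq : ¬ (pairs[k] == head) = true := by
        intro hb; exact h ⟨hk2, by rw [hget]; exact hb⟩
      have hdrop : pairs.drop k = pairs[k] :: pairs.drop (k + 1) :=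
        List.drop_eq_getElem_cons hk2
      rw [hdrop, List.takeWhile_cons]
      simp [hbeq]
    · rw [List.drop_eq_nil_of_le hk2]
      simp
termination_by pairs.length - k
decreasing_by omega

theorem pvOuterLoop_spec (pairs : List (List Char)) (j : Nat) (out : List (List Char))
    (hj : j ≤ pairs.length) :
    (pvOuterLoop pairs j out).flatten = out.flatten ++ pvEncodeList (pairs.drop j) := by
  rw [pvOuterLoop]
  split
  · rename_i h
    have hscan := pvInnerScan_spec pairs (pairs.getD j []) (j + 1)
    have htw : ((pairs.drop (j + 1)).takeWhile (· == pairs.getD j [])).length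
        ≤ (pairs.drop (j + 1)).length := ((pairs.drop (j + 1)).takeWhile_sublist _).length_le
    have hlen : (pairs.drop (j + 1)).length = pairs.length - (j + 1) := List.length_drop
    have hrec := pvOuterLoop_spec pairs (pvInnerScan pairs (pairs.getD j []) (j + 1))
      (out ++ [pairs.getD j [] ++ PySem.Int.toChars
        ((pvInnerScan pairs (pairs.getD j []) (j + 1) : Int) - (j : Int))])
      (by omega)
    rw [hrec, List.flatten_append]
    have hget : pairs.getD j [] = pairs[j] := List.getD_eq_getElem pairs [] h
    have hdropj : pairs.drop j = pairs[j] :: pairs.drop (j + 1) :=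
      List.drop_eq_getElem_cons h
    rw [hdropj, pvEncodeList, hscan, hget]
    have hdropk : pairs.drop (j + 1 + ((pairs.drop (j + 1)).takeWhile (· == pairs[j])).length)
        = (pairs.drop (j + 1)).dropWhile (· == pairs[j]) := by
      rw [pvDropWhile_eq_drop, List.drop_drop]
    rw [hdropk]
    have harg : ((j : Int) + 1 + ((pairs.drop (j + 1)).takeWhile (· == pairs[j])).length - j)
        = (((pairs.drop (j + 1)).takeWhile (· == pairs[j])).length : Int) + 1 := by
      ring
    simp only [List.flatten_cons, List.flatten_nil, List.append_nil, List.append_assoc]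
    push_cast
    rw [harg]
  · rename_i h
    rw [List.drop_eq_nil_of_le (by omega), pvEncodeList]
    simp
termination_by pairs.length - j
decreasing_by
  have := pvInnerScan_ge pairs (pairs.getD j []) (j + 1); omega

theorem pvFoldA_spec (ps : List (List Char)) (res : List (List Char)) (c : Int) (prev : List Char) :
    ((ps.foldl pvStepA (res, c, prev)).1
        ++ [(ps.foldl pvStepA (res, c, prev)).2.2
              ++ PySem.Int.toChars (ps.foldl pvStepA (res, c, prev)).2.1]).flatten
      = res.flatten ++ pvEncW prev c ps := by
  induction ps generalizing res c prev with
  | nil => simp [pvEncW, List.flatten_append]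
  | cons p rest ih =>
    simp only [List.foldl_cons]
    by_cases hp : p == prev
    · rw [show pvStepA (res, c, prev) p = (res, c + 1, prev) by simp [pvStepA, hp]]
      rw [ih, pvEncW, if_pos hp]
    · rw [show pvStepA (res, c, prev) p
          = (res ++ [prev ++ PySem.Int.toChars c], 1, p) by simp [pvStepA, hp]]
      rw [ih, pvEncW, if_neg hp, List.flatten_append]
      simp [List.append_assoc]

theorem pvChunks_eq (m : Nat) (cs : List Char) (h : cs.length = 2 * m) :
    (List.range m).map (fun k => (cs.drop (2 * k)).take 2) = pvChunks cs := by
  induction m generalizing cs with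
  | zero =>
    have hnil : cs = [] := List.length_eq_zero_iff.mp (by omega)
    subst hnil
    simp [pvChunks]
  | succ m ih =>
    match cs, h with
    | a :: b :: rest, h =>
      rw [List.range_succ_eq_map, List.map_cons, List.map_map]
      have h1 : ((a :: b :: rest).drop (2 * 0)).take 2 = [a, b] := by simp
      have h2 : (List.range m).map ((fun k => ((a :: b :: rest).drop (2 * k)).take 2) ∘ Nat.succ)
          = (List.range m).map (fun k => (rest.drop (2 * k)).take 2) := by
        apply List.map_congr_left
        intro k _
        simp only [Function.comp]
        have h3 : 2 * Nat.succ k = 2 * k + 1 + 1 := by omega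
        rw [h3, List.drop_succ_cons, List.drop_succ_cons]
      rw [h1, h2, ih rest (by simp at h; omega), pvChunks]

-- slice over even indices = take-2/drop chunks
theorem pvSliceMap (cs : List Char) (n : Nat) (a : Int) (ha : 0 ≤ a) :
    (List.range n).map (fun (k : Nat) => PySem.Chars.slice cs (some (a + 2 * (k : Int))) (some (a + 2 * (k : Int) + 2)))
      = (List.range n).map (fun k => ((cs.drop a.toNat).drop (2 * k)).take 2) := by
  apply List.map_congr_left
  intro k _
  show PySem.List.slice cs (some (a + 2 * (k:Int))) (some (a + 2 * (k:Int) + 2)) = _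
  rw [PySem.List.slice_toNat (a := a + 2 * (k:Int)) (b := a + 2 * (k:Int) + 2) cs (by omega) (by omega)]
  have h1 : (a + 2 * (k:Int) + 2).toNat - (a + 2 * (k:Int)).toNat = 2 := by omega
  have h2 : (a + 2 * (k:Int)).toNat = a.toNat + 2 * k := by omega
  rw [h1, h2, ← List.drop_drop]

theorem pvA_pairs (cs : List Char) (M : Nat) (h : cs.length = 2 * M) (h1 : 1 ≤ M) :
    (PySem.List.pyRange 2 (cs.length : Int) 2).map
        (fun i => PySem.Chars.slice cs (some i) (some (i + 2)))
      = pvChunks (cs.drop 2) := by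
  rw [PySem.List.pyRange_of_pos 2 (cs.length : Int) (by norm_num), List.map_map]
  have hn : (if (2:Int) < (cs.length : Int) then (((cs.length : Int) - 2 + 2 - 1) / 2).toNat else 0) = M - 1 := by
    split <;> omega
  rw [hn]
  have := pvSliceMap cs (M - 1) 2 (by norm_num)
  rw [show ((2:Int).toNat) = 2 from rfl] at this
  rw [show (Function.comp (fun i => PySem.Chars.slice cs (some i) (some (i + 2))) (fun k : Nat => (2:Int) + 2 * (k:Int)))
        = (fun (k : Nat) => PySem.Chars.slice cs (some ((2:Int) + 2 * (k : Int))) (some ((2:Int) + 2 * (k : Int) + 2))) from rfl,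
     this]
  exact pvChunks_eq (M - 1) (cs.drop 2) (by simp; omega)

theorem pvB_pairs (cs : List Char) (M : Nat) (h : cs.length = 2 * M) :
    (PySem.List.pyRange 0 (cs.length : Int) 2).map
        (fun i => PySem.Chars.slice cs (some i) (some (i + 2)))
      = pvChunks cs := by
  rw [PySem.List.pyRange_of_pos 0 (cs.length : Int) (by norm_num), List.map_map]
  have hn : (if (0:Int) < (cs.length : Int) then (((cs.length : Int) - 0 + 2 - 1) / 2).toNat else 0) = M := by
    split <;> omega
  rw [hn]
  have hsm := pvSliceMap cs M 0 (by norm_num)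
  simp only [Int.toNat_zero, List.drop_zero] at hsm
  rw [show (Function.comp (fun i => PySem.Chars.slice cs (some i) (some (i + 2))) (fun k : Nat => (0:Int) + 2 * (k:Int)))
        = (fun (k : Nat) => PySem.Chars.slice cs (some ((0:Int) + 2 * (k : Int))) (some ((0:Int) + 2 * (k : Int) + 2))) from rfl,
     hsm]
  exact pvChunks_eq M cs h

theorem pvBridge (cs : List Char) (h : 2 ≤ cs.length) :
    pvEncW (cs.take 2) 1 (pvChunks (cs.drop 2)) = pvEncodeList (pvChunks cs) := by
  match cs, h with
  | a :: b :: rest, _ =>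
    show pvEncW [a, b] 1 (pvChunks rest) = pvEncodeList (pvChunks (a :: b :: rest))
    rw [pvEncW_spec, show pvChunks (a :: b :: rest) = [a, b] :: pvChunks rest from rfl,
      pvEncodeList, add_comm]

-- ===== VERDICT (by name: the statement is the Claim_ definition above) =====
theorem find_repeating_pairs_spec : Claim_equal_find_repeating_pairs := by
  intro s _
  unfold Spec_find_repeating_pairs
  by_cases hg : PySem.Str.len s < 2 ∨ PySem.Int.mod (PySem.Str.len s) 2 ≠ 0
  · rw [find_repeating_pairs, find_repeating_pairs_alt, if_pos hg, if_pos hg]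
  · have hlen2 : ¬ PySem.Str.len s < 2 := fun h => hg (Or.inl h)
    have hmod : PySem.Int.mod (PySem.Str.len s) 2 = 0 := by
      by_contra h; exact hg (Or.inr h)
    have hdvd : (2:Int) ∣ PySem.Str.len s := (PySem.Int.mod_eq_zero_iff_dvd _ _).mp hmod
    rw [PySem.Str.len_eq] at hlen2 hdvd
    obtain ⟨M, hMl, hM1⟩ : ∃ M : Nat, s.toList.length = 2 * M ∧ 1 ≤ M := by
      obtain ⟨k, hk⟩ := hdvd
      exact ⟨k.toNat, by omega, by omega⟩
    rw [find_repeating_pairs, find_repeating_pairs_alt, if_neg hg, if_neg hg]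
    simp only [PySem.Str.len_eq]
    rw [← List.foldl_map (f := fun i => PySem.Chars.slice s.toList (some i) (some (i + 2)))
        (g := pvStepA)]
    rw [pvA_pairs s.toList M hMl hM1, pvB_pairs s.toList M hMl]
    have hprev : PySem.Chars.slice s.toList (some 0) (some 2) = s.toList.take 2 := by
      show PySem.List.slice s.toList (some 0) (some 2) = _
      rw [PySem.List.slice_toNat (a := 0) (b := 2) s.toList (by norm_num) (by norm_num)]
      norm_num
      rfl
    rw [hprev]
    congr 1
    rw [pvFoldA_spec, pvOuterLoop_spec _ _ _ (by omega), List.drop_zero]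
    simp only [List.flatten_nil, List.nil_append]
    exact pvBridge s.toList (by omega)
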